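-- pv_equiv track=rewrite | github.com/yoola/kalender_project | scheduler/api/make_job_list.py | get_every_number_list
-- ===== SOURCE A (Python) =====
-- def get_every_number_list(every_numbers, date_numbers):
--     list_every_numbers = []
--
--     if every_numbers[0] > every_numbers[1]:
--         every_numbers[1] = every_numbers[1] + 7
--
--     list_every_numbers.append([every_numbers[0], every_numbers[1]])
--
--     i = every_numbers[0]
--     while i < date_numbers[1] - 6:
--         every_numbers[0] += 7
--         every_numbers[1] += 7
--         list_every_numbers.append([every_numbers[0], every_numbers[1]])
--         i += 7
--
--     return list_every_numbers
-- ===== SOURCE B (Python) =====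
-- def get_every_number_list(every_numbers, date_numbers):
--     # Closed-form iteration count instead of a while loop.
--     # Note: unlike the original, this does not mutate every_numbers in place;
--     # the equivalence claimed is about the return value only.
--     s = every_numbers[0]
--     e = every_numbers[1]
--     if s > e:
--         e = e + 7
--     bound = date_numbers[1] - 6
--     n = (bound - s + 6) // 7 if s < bound else 0
--     return [[s + 7 * k, e + 7 * k] for k in range(n + 1)]
-- ===== Notes on version B (the rewrite author's own statement) =====
-- stated objective: simpler
-- what changed: Replaces the while loop that steps cursors by 7 with a closed-form iteration count and a single range-based comprehension generating the pairs directly; B does not mutate every_numbers in place (return-value equivalence).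
import Mathlib
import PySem

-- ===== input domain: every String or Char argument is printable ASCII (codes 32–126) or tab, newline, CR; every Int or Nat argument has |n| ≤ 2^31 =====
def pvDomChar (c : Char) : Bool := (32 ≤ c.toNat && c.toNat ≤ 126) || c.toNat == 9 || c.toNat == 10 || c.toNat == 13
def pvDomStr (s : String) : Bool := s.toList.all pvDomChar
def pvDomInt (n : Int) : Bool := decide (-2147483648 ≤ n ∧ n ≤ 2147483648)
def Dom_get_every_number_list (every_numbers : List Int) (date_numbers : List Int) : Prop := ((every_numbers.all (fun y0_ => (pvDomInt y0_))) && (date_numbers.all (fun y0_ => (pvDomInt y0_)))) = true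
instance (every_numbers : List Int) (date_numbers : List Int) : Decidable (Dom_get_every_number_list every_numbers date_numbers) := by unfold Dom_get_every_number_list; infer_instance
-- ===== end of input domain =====

-- B replaces A's while loop by a closed-form iteration count and one generation pass;
-- A mutates every_numbers in place, B does not: the equivalence here is about the RETURN value only.

-- ===== PORT A =====
-- the while loop of A: state (i, s, e) = (i, every_numbers[0], every_numbers[1]), acc = list_every_numbers
def pvLoopA (bound : Int) (i s e : Int) (acc : List (List Int)) : List (List Int) :=
  if i < bound then pvLoopA bound (i + 7) (s + 7) (e + 7) (acc ++ [[s + 7, e + 7]]) else acc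
termination_by (bound - i).toNat
decreasing_by omega

def get_every_number_list (every_numbers : List Int) (date_numbers : List Int) : List (List Int) :=
  let e0 := PySem.List.pyGetD every_numbers 0 0
  let e1 := PySem.List.pyGetD every_numbers 1 0
  let e1 := if e0 > e1 then e1 + 7 else e1
  let acc : List (List Int) := [[e0, e1]]
  pvLoopA (PySem.List.pyGetD date_numbers 1 0 - 6) e0 e0 e1 acc

-- ===== PORT B =====
def get_every_number_list_alt (every_numbers : List Int) (date_numbers : List Int) : List (List Int) :=
  let s := PySem.List.pyGetD every_numbers 0 0
  let e := PySem.List.pyGetD every_numbers 1 0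
  let e := if s > e then e + 7 else e
  let bound := PySem.List.pyGetD date_numbers 1 0 - 6
  let n : Int := if s < bound then PySem.Int.floordiv (bound - s + 6) 7 else 0
  (PySem.List.pyRange 0 (n + 1) 1).map (fun k => [s + 7 * k, e + 7 * k])

-- ===== PRECONDITION & SPEC =====
-- A indexes every_numbers[0], every_numbers[1] and date_numbers[1]: shorter lists raise IndexError.
def Pre_get_every_number_list (every_numbers : List Int) (date_numbers : List Int) : Prop :=
  2 ≤ every_numbers.length ∧ 2 ≤ date_numbers.length
instance (every_numbers : List Int) (date_numbers : List Int) : Decidable (Pre_get_every_number_list every_numbers date_numbers) := by unfold Pre_get_every_number_list; infer_instance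
def pvWitness_get_every_number_list : List Int × List Int := ([3, 5], [1, 20])

def Spec_get_every_number_list (every_numbers : List Int) (date_numbers : List Int) (out : List (List Int)) : Prop := out = get_every_number_list_alt every_numbers date_numbers
instance (every_numbers : List Int) (date_numbers : List Int) (out : List (List Int)) : Decidable (Spec_get_every_number_list every_numbers date_numbers out) := by unfold Spec_get_every_number_list; infer_instance

-- ===== CLAIM (what is proved, stated in full; the proofs are below) =====
def Claim_equal_get_every_number_list : Prop := ∀ (every_numbers : List Int) (date_numbers : List Int), Dom_get_every_number_list every_numbers date_numbers → Pre_get_every_number_list every_numbers date_numbers → Spec_get_every_number_list every_numbers date_numbers (get_every_number_list every_numbers date_numbers)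

-- ===== LEMMAS AND PROOFS =====

-- iteration count of A's loop starting at cursor i (matches B's n, as a Nat)
def pvCnt (bound i : Int) : Nat :=
  (if i < bound then PySem.Int.floordiv (bound - i + 6) 7 else 0).toNat

lemma pvCnt_rec {bound i : Int} (h : i < bound) : pvCnt bound i = pvCnt bound (i + 7) + 1 := by
  unfold pvCnt
  rw [PySem.Int.floordiv_eq_ediv_of_pos (by omega : (0:Int) < 7)]
  by_cases h7 : i + 7 < bound
  · rw [if_pos h, if_pos h7, PySem.Int.floordiv_eq_ediv_of_pos (by omega : (0:Int) < 7)]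
    omega
  · rw [if_pos h, if_neg h7]
    omega

lemma pvLoopA_spec (bound d : Int) :
    ∀ (n : Nat) (i : Int), n = pvCnt bound i → ∀ (acc : List (List Int)),
      pvLoopA bound i i (i + d) acc
        = acc ++ (List.range n).map (fun k : Nat => [i + 7 * ((k : Int) + 1), i + d + 7 * ((k : Int) + 1)]) := by
  intro n
  induction n with
  | zero =>
    intro i hn acc
    unfold pvLoopA
    rw [if_neg]
    · simp
    · intro h
      rw [pvCnt_rec h] at hn
      omega
  | succ m ih =>
    intro i hn acc
    unfold pvLoopA
    have h : i < bound := by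
      by_contra h
      unfold pvCnt at hn
      rw [if_neg h] at hn
      simp at hn
    rw [if_pos h]
    have hm : m = pvCnt bound (i + 7) := by
      rw [pvCnt_rec h] at hn; omega
    have := ih (i + 7) hm (acc ++ [[i + 7, i + d + 7]])
    have harg : i + d + 7 = (i + 7) + d := by ring
    rw [harg] at this ⊢
    rw [this, List.range_succ_eq_map, List.map_cons, List.map_map]
    simp only [List.append_assoc, List.cons_append, List.nil_append]
    congr 1
    refine List.cons_eq_cons.mpr ⟨?_, List.map_congr_left fun k _ => ?_⟩
    · simp only [Nat.cast_zero, List.cons.injEq, and_true]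
      exact ⟨by ring, by ring⟩
    · simp only [Function.comp_apply, List.cons.injEq, and_true]
      push_cast
      exact ⟨by ring, by ring⟩

lemma pv_main (every_numbers date_numbers : List Int) :
    get_every_number_list every_numbers date_numbers
      = get_every_number_list_alt every_numbers date_numbers := by
  unfold get_every_number_list get_every_number_list_alt
  set s := PySem.List.pyGetD every_numbers 0 0 with hs
  set e1 := PySem.List.pyGetD every_numbers 1 0 with he1
  set e := if s > e1 then e1 + 7 else e1 with he
  set bound := PySem.List.pyGetD date_numbers 1 0 - 6 with hbound
  set nI : Int := if s < bound then PySem.Int.floordiv (bound - s + 6) 7 else 0 with hnI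
  have hn0 : 0 ≤ nI := by
    rw [hnI]
    split
    · rw [PySem.Int.floordiv_eq_ediv_of_pos (by omega : (0:Int) < 7)]
      omega
    · omega
  have hcnt : pvCnt bound s = nI.toNat := by
    unfold pvCnt; rw [hnI]
  have hA := pvLoopA_spec bound (e - s) (pvCnt bound s) s rfl [[s, e]]
  have hes : s + (e - s) = e := by ring
  rw [hes] at hA
  rw [hA, hcnt]
  show _ = (PySem.List.pyRange 0 (nI + 1) 1).map (fun k => [s + 7 * k, e + 7 * k])
  rw [PySem.List.pyRange_one]
  have htn : (nI + 1 - 0).toNat = nI.toNat + 1 := by omega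
  rw [htn, List.map_map, List.range_succ_eq_map, List.map_cons, List.map_map]
  simp only [Function.comp, List.cons_append, List.nil_append]
  refine List.cons_eq_cons.mpr ⟨?_, List.map_congr_left fun k _ => ?_⟩
  · simp only [Nat.cast_zero, List.cons.injEq, and_true]
    exact ⟨by ring, by ring⟩
  · simp only [Function.comp_apply, List.cons.injEq, and_true]
    push_cast
    exact ⟨by ring, by ring⟩

-- ===== VERDICT (by name: the statement is the Claim_ definition above) =====
theorem get_every_number_list_spec : Claim_equal_get_every_number_list := by
  intro ev dn _ _
  unfold Spec_get_every_number_list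
  exact pv_main ev dn
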